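-- pv_equiv track=rewrite | github.com/DominusCube/PythonPruteForce | functions.py | calPossiblePass
-- ===== SOURCE A (Python) =====
-- import itertools
--
-- def calPossiblePass(passList, repAllowed, possibleValues, nPerms):
--   originalPassList = passList.copy()
--   underscoreAmount = passList.count("_")
--   if repAllowed:
--     perms = [p for p in itertools.product(possibleValues, repeat=underscoreAmount)]
--   else:
--     perms = list(itertools.permutations(possibleValues, underscoreAmount))
--   allPerms = []
--   for perm in perms:
--     permString = ''.join(perm)
--     permIndex = 0
--     for count, value in enumerate(passList):
--       if value == "_":
--         passList[count] = permString[permIndex]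
--         permIndex = permIndex + 1
--     allPerms.append(''.join(passList))
--     passList = originalPassList.copy()
--   return allPerms
-- ===== SOURCE B (Python) =====
-- import itertools
--
-- def calPossiblePass(passList, repAllowed, possibleValues, nPerms):
--     k = passList.count("_")
--     # split the template once into the k+1 fixed segments around the underscores
--     segs = []
--     cur = []
--     for v in passList:
--         if v == "_":
--             segs.append(''.join(cur))
--             cur = []
--         else:
--             cur.append(v)
--     segs.append(''.join(cur))
--     if repAllowed:
--         perms = itertools.product(possibleValues, repeat=k)
--     else:
--         perms = itertools.permutations(possibleValues, k)
--     out = []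
--     for perm in perms:
--         s = ''.join(perm)
--         pieces = [segs[0]]
--         for i in range(k):
--             pieces.append(s[i])
--             pieces.append(segs[i + 1])
--         out.append(''.join(pieces))
--     return out
-- ===== Notes on version B (the rewrite author's own statement) =====
-- stated objective: idiomatic
-- what changed: B splits the template once into the k+1 fixed segments around the underscores and builds each password by interleaving those segments with the characters of each joined permutation via join, instead of rescanning the whole template and mutating it cell by cell (then re-copying it) for every permutation.
-- outside the precondition, e.g. on calPossiblePass(['_', '_'], False, ['', 'ab'], 0): A returns ['ab', 'ab'], B returns ['ab', 'ab']; on calPossiblePass(['_', '_'], False, [''], 0): A returns [], B returns []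
import Mathlib
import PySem

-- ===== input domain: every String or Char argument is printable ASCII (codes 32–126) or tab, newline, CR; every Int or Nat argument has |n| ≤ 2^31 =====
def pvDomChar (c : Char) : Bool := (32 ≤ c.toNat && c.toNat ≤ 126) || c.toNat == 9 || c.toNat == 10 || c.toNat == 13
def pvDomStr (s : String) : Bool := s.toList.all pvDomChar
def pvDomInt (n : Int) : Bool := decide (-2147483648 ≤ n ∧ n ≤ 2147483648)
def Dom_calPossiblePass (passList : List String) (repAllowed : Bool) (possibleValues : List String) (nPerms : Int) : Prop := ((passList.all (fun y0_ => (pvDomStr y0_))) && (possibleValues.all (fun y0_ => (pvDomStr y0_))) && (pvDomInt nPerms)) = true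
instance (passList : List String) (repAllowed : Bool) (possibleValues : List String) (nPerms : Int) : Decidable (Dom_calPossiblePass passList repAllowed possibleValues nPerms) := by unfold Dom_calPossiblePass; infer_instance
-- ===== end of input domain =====

-- B rebuilds each password by interleaving the k+1 fixed template segments (computed once)
-- with the characters of each joined permutation, instead of rescanning and mutating the
-- template list for every permutation (objective: idiomatic; equivalence is about the return
-- value only — Python A also mutates the caller's passList in place during the first
-- iteration, B does not).

-- ===== PORT A =====
-- itertools.product(vals, repeat=n) over strings, in itertools order (used by both Pythons)
def pyProductRep (vals : List String) : Nat → List (List String)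
  | 0 => [[]]
  | n + 1 => vals.flatMap (fun v => (pyProductRep vals n).map (fun t => v :: t))

-- itertools.permutations(vals, n) over strings, in itertools order (used by both Pythons)
def pyPermutations : Nat → List String → List (List String)
  | 0, _ => [[]]
  | n + 1, vals =>
      (List.range vals.length).flatMap
        (fun i => (pyPermutations n (vals.eraseIdx i)).map (fun t => vals.getD i "" :: t))

-- s[i] as a Python 1-character string (both Pythons index the joined permutation this way);
-- none = IndexError, defaulted to "" — reached only outside Pre_calPossiblePass
def cstrS (s : String) (i : Int) : String :=
  match PySem.Str.pyGet? s i with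
  | some c => String.ofList [c]
  | none => ""

-- port of A: per permutation, scan passList with enumerate, overwrite each "_" cell with the
-- next character of the joined permutation, join the mutated list, then reset it to the copy.
def calPossiblePass (passList : List String) (repAllowed : Bool) (possibleValues : List String) (nPerms : Int) : List String :=
  let originalPassList := passList
  let underscoreAmount := PySem.List.count passList "_"
  let perms := if repAllowed then pyProductRep possibleValues underscoreAmount
               else pyPermutations underscoreAmount possibleValues
  (perms.foldl (fun (st : List String × List String) perm =>
      let permString := PySem.Str.join "" perm
      let inner := (PySem.List.enumerate st.2).foldl
        (fun (acc : List String × Int) cv =>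
          if cv.2 = "_" then
            (PySem.List.pySetD acc.1 cv.1 (cstrS permString acc.2), acc.2 + 1)
          else acc) (st.2, 0)
      (st.1 ++ [PySem.Str.join "" inner.1], originalPassList))
    ([], passList)).1

-- ===== PORT B =====
-- port of B: split the template once into the k+1 fixed segments around the underscores,
-- then per permutation interleave the segments with the characters of the joined permutation.
def calPossiblePass_alt (passList : List String) (repAllowed : Bool) (possibleValues : List String) (nPerms : Int) : List String :=
  let k := PySem.List.count passList "_"
  let sc := passList.foldl
      (fun (st : List String × List String) v =>
        if v = "_" then (st.1 ++ [PySem.Str.join "" st.2], [])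
        else (st.1, st.2 ++ [v])) ([], [])
  let segs := sc.1 ++ [PySem.Str.join "" sc.2]
  let perms := if repAllowed then pyProductRep possibleValues k
               else pyPermutations k possibleValues
  perms.foldl (fun out perm =>
    let s := PySem.Str.join "" perm
    let pieces := (PySem.List.pyRange 0 (k : Int)).foldl
      (fun (pieces : List String) i =>
        pieces ++ [cstrS s i, PySem.List.pyGetD segs (i + 1) ""])
      [PySem.List.pyGetD segs 0 ""]
    out ++ [PySem.Str.join "" pieces]) []

-- ===== PRECONDITION & SPEC =====
-- Pre_ excludes inputs whose template contains an underscore while possibleValues contains an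
-- empty string: there A's indexing permString[permIndex] typically raises IndexError (on the
-- few such inputs where A still returns — empty permutation list, or other values supplying
-- enough characters — B returns the same value anyway).
def Pre_calPossiblePass (passList : List String) (repAllowed : Bool) (possibleValues : List String) (nPerms : Int) : Prop :=
  PySem.List.count passList "_" = 0 ∨ ∀ v ∈ possibleValues, v ≠ ""
instance (passList : List String) (repAllowed : Bool) (possibleValues : List String) (nPerms : Int) : Decidable (Pre_calPossiblePass passList repAllowed possibleValues nPerms) := by unfold Pre_calPossiblePass; infer_instance

def pvWitness_calPossiblePass : List String × Bool × List String × Int := (["a", "_", "b", "_"], true, ["x", "y"], 0)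

def Spec_calPossiblePass (passList : List String) (repAllowed : Bool) (possibleValues : List String) (nPerms : Int) (out : List String) : Prop := out = calPossiblePass_alt passList repAllowed possibleValues nPerms
instance (passList : List String) (repAllowed : Bool) (possibleValues : List String) (nPerms : Int) (out : List String) : Decidable (Spec_calPossiblePass passList repAllowed possibleValues nPerms out) := by unfold Spec_calPossiblePass; infer_instance

-- ===== CLAIM (what is proved, stated in full; the proofs are below) =====
def Claim_equal_calPossiblePass : Prop := ∀ (passList : List String) (repAllowed : Bool) (possibleValues : List String) (nPerms : Int), Dom_calPossiblePass passList repAllowed possibleValues nPerms → Pre_calPossiblePass passList repAllowed possibleValues nPerms → Spec_calPossiblePass passList repAllowed possibleValues nPerms (calPossiblePass passList repAllowed possibleValues nPerms)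

-- ===== LEMMAS AND PROOFS =====
-- NOTE: the equivalence below is in fact unconditional (the proofs never use Pre_ or Dom_);
-- Pre_ is there because Python A raises on (some of) the excluded inputs.

-- cstrS at char-list level
def cstrL (s : String) (i : Int) : List Char :=
  match PySem.Str.pyGet? s i with
  | some c => [c]
  | none => []

lemma toList_cstrS (s : String) (i : Int) : (cstrS s i).toList = cstrL s i := by
  unfold cstrS cstrL
  cases PySem.Str.pyGet? s i <;> simp

-- A's inner loop, purified: replace successive "_" entries by successive chars of s
def repl (s : String) : List String → Int → List String
  | [], _ => []
  | v :: r, i => if v = "_" then cstrS s i :: repl s r (i + 1) else v :: repl s r i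

-- B's segment split, purified (c = the pending segment pieces)
def segsF : List String → List String → List String
  | [], c => [PySem.Str.join "" c]
  | v :: r, c => if v = "_" then PySem.Str.join "" c :: segsF r [] else segsF r (c ++ [v])

lemma segsF_ne_nil (xs c : List String) : segsF xs c ≠ [] := by
  induction xs generalizing c with
  | nil => simp [segsF]
  | cons v r ih => by_cases h : v = "_" <;> simp [segsF, h, ih]

lemma length_segsF (xs : List String) (c : List String) :
    (segsF xs c).length = PySem.List.count xs "_" + 1 := by
  induction xs generalizing c with
  | nil => simp [segsF, PySem.List.count]
  | cons v r ih =>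
      by_cases h : v = "_" <;>
        simp [segsF, h, ih, PySem.List.count, List.count_cons]

-- ''.join with empty separator is concatenation (char level)
lemma join_empty_flatten (L : List (List Char)) :
    PySem.Chars.join [] L = L.flatten := by
  induction L with
  | nil => simp [PySem.Chars.join_nil]
  | cons a L ih =>
      cases L with
      | nil => simp [PySem.Chars.join_singleton]
      | cons b M => simp [PySem.Chars.join_cons_cons, ih]

lemma toList_join_empty (parts : List String) :
    (PySem.Str.join "" parts).toList = (parts.map String.toList).flatten := by
  rw [PySem.Str.toList_join]
  simpa using join_empty_flatten (parts.map String.toList)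

-- interleave char segments with the chars of s starting at index i
def ilv (s : String) : List (List Char) → Int → List Char
  | [], _ => []
  | [t], _ => t
  | t :: u :: rest, i => t ++ cstrL s i ++ ilv s (u :: rest) (i + 1)

-- ===== A-side lemmas =====

-- A's inner-loop body, named (definitionally the lambda in the port)
def aStep (s : String) (acc : List String × Int) (cv : Int × String) : List String × Int :=
  if cv.2 = "_" then (PySem.List.pySetD acc.1 cv.1 (cstrS s acc.2), acc.2 + 1) else acc

lemma inner_loop_eq (s : String) (xs : List String) :
    ∀ (pre : List String) (pi : Int),
      ((PySem.List.enumerate xs (pre.length : Int)).foldl (aStep s) (pre ++ xs, pi))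
      = (pre ++ repl s xs pi, pi + (PySem.List.count xs "_" : Int)) := by
  induction xs with
  | nil => intro pre pi; simp [PySem.List.enumerate_nil, repl, PySem.List.count]
  | cons v r ih =>
      intro pre pi
      rw [PySem.List.enumerate_cons, List.foldl_cons]
      by_cases h : v = "_"
      · subst h
        rw [show aStep s (pre ++ "_" :: r, pi) ((pre.length : Int), "_")
              = (PySem.List.pySetD (pre ++ "_" :: r) (pre.length : Int) (cstrS s pi), pi + 1) from by
            simp [aStep]]
        rw [PySem.List.pySetD_natCast]
        rw [show (pre ++ "_" :: r).set pre.length (cstrS s pi) = (pre ++ [cstrS s pi]) ++ r from by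
            rw [List.set_append]; simp]
        rw [show ((pre.length : Int) + 1) = (((pre ++ [cstrS s pi]).length : Int)) from by simp]
        rw [ih (pre ++ [cstrS s pi]) (pi + 1)]
        simp [repl, PySem.List.count]
        ring
      · rw [show aStep s (pre ++ v :: r, pi) ((pre.length : Int), v) = (pre ++ v :: r, pi) from by
            simp [aStep, h]]
        rw [show (pre.length : Int) + 1 = ((pre ++ [v]).length : Int) from by simp]
        rw [show pre ++ v :: r = (pre ++ [v]) ++ r from by simp]
        rw [ih (pre ++ [v]) pi]
        simp [repl, h, PySem.List.count]

-- A's per-permutation result on the (conceptually unchanged) original template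
def aBody (passList : List String) (perm : List String) : String :=
  PySem.Str.join "" (repl (PySem.Str.join "" perm) passList 0)

lemma a_fold_eq (passList : List String) (perms : List (List String)) :
    ∀ acc : List String,
      (perms.foldl (fun (st : List String × List String) perm =>
        (st.1 ++ [PySem.Str.join ""
          (((PySem.List.enumerate st.2).foldl (aStep (PySem.Str.join "" perm)) (st.2, 0)).1)],
         passList))
      (acc, passList)).1 = acc ++ perms.map (aBody passList) := by
  induction perms with
  | nil => intro acc; simp
  | cons p ps ih =>
      intro acc
      simp only [List.foldl_cons]
      have h1 := inner_loop_eq (PySem.Str.join "" p) passList [] 0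
      simp only [List.length_nil, Nat.cast_zero, List.nil_append] at h1
      rw [h1, ih]
      simp [aBody]

lemma A_closed (passList : List String) (repAllowed : Bool) (possibleValues : List String) (nPerms : Int) :
    calPossiblePass passList repAllowed possibleValues nPerms
      = (if repAllowed then pyProductRep possibleValues (PySem.List.count passList "_")
         else pyPermutations (PySem.List.count passList "_") possibleValues).map (aBody passList) := by
  unfold calPossiblePass
  exact a_fold_eq passList _ []

-- ===== B-side lemmas =====

lemma b_segs_eq (xs : List String) :
    ∀ (A c : List String),
      ((xs.foldl
        (fun (st : List String × List String) v =>
          if v = "_" then (st.1 ++ [PySem.Str.join "" st.2], [])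
          else (st.1, st.2 ++ [v])) (A, c)).1
       ++ [PySem.Str.join ""
            ((xs.foldl
              (fun (st : List String × List String) v =>
                if v = "_" then (st.1 ++ [PySem.Str.join "" st.2], [])
                else (st.1, st.2 ++ [v])) (A, c)).2)]) = A ++ segsF xs c := by
  induction xs with
  | nil => intro A c; simp [segsF]
  | cons v r ih =>
      intro A c
      by_cases h : v = "_"
      · subst h
        rw [List.foldl_cons,
          show (if ("_" : String) = "_"
              then ((A, c).1 ++ [PySem.Str.join "" (A, c).2], ([] : List String))
              else ((A, c).1, (A, c).2 ++ ["_"]))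
            = (A ++ [PySem.Str.join "" c], ([] : List String)) from by simp]
        rw [ih (A ++ [PySem.Str.join "" c]) []]
        simp [segsF]
      · rw [List.foldl_cons,
          show (if v = "_"
              then ((A, c).1 ++ [PySem.Str.join "" (A, c).2], ([] : List String))
              else ((A, c).1, (A, c).2 ++ [v]))
            = (A, c ++ [v]) from by simp [h]]
        rw [ih A (c ++ [v])]
        simp [segsF, h]

-- B's per-permutation result from the precomputed segments
def bBody (passList : List String) (perm : List String) : String :=
  PySem.Str.join ""
    ((PySem.List.pyRange 0 ((PySem.List.count passList "_" : Nat) : Int)).foldl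
      (fun (pieces : List String) i =>
        pieces ++ [cstrS (PySem.Str.join "" perm) i,
                   PySem.List.pyGetD (segsF passList []) (i + 1) ""])
      [PySem.List.pyGetD (segsF passList []) 0 ""])

lemma b_map_eq (g : List String → String) (perms : List (List String)) :
    ∀ acc : List String,
      perms.foldl (fun out perm => out ++ [g perm]) acc = acc ++ perms.map g := by
  induction perms with
  | nil => intro acc; simp
  | cons p ps ih => intro acc; simp only [List.foldl_cons]; rw [ih]; simp

lemma B_closed (passList : List String) (repAllowed : Bool) (possibleValues : List String) (nPerms : Int) :
    calPossiblePass_alt passList repAllowed possibleValues nPerms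
      = (if repAllowed then pyProductRep possibleValues (PySem.List.count passList "_")
         else pyPermutations (PySem.List.count passList "_") possibleValues).map (bBody passList) := by
  have hgen : ∀ segs : List String, segs = segsF passList [] →
      ((if repAllowed then pyProductRep possibleValues (PySem.List.count passList "_")
        else pyPermutations (PySem.List.count passList "_") possibleValues).foldl
        (fun out perm =>
          out ++ [PySem.Str.join ""
            ((PySem.List.pyRange 0 ((PySem.List.count passList "_" : Nat) : Int)).foldl
              (fun (pieces : List String) i =>
                pieces ++ [cstrS (PySem.Str.join "" perm) i,
                           PySem.List.pyGetD segs (i + 1) ""])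
              [PySem.List.pyGetD segs 0 ""])]) [])
      = (if repAllowed then pyProductRep possibleValues (PySem.List.count passList "_")
         else pyPermutations (PySem.List.count passList "_") possibleValues).map (bBody passList) := by
    intro segs hsegs
    subst hsegs
    exact b_map_eq (bBody passList) _ []
  have hseg := b_segs_eq passList [] []
  simp only [List.nil_append] at hseg
  unfold calPossiblePass_alt
  exact hgen _ hseg

lemma b_pieces_eq (s : String) (segs : List String) (k : Nat) :
    ((PySem.List.pyRange 0 (k : Int)).foldl
      (fun (pieces : List String) i =>
        pieces ++ [cstrS s i, PySem.List.pyGetD segs (i + 1) ""])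
      [PySem.List.pyGetD segs 0 ""])
    = segs.getD 0 "" ::
        (List.range k).flatMap (fun (i : Nat) => [cstrS s (i : Int), segs.getD (i + 1) ""]) := by
  induction k with
  | zero =>
      have hr : PySem.List.pyRange 0 (((0 : Nat)) : Int) = [] := by
        rw [PySem.List.pyRange_zero_natCast]; simp
      rw [hr]
      have h0 : PySem.List.pyGetD segs 0 "" = segs.getD 0 "" := by
        simpa using PySem.List.pyGetD_natCast segs 0 ""
      simp [h0]
  | succ k ih =>
      have hr : PySem.List.pyRange 0 (((k + 1 : Nat)) : Int)
          = PySem.List.pyRange 0 ((k : Nat) : Int) ++ [(k : Int)] := by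
        rw [PySem.List.pyRange_zero_natCast, PySem.List.pyRange_zero_natCast, List.range_succ]
        simp
      rw [hr, List.foldl_append, ih, List.range_succ, List.flatMap_append]
      have h1 : PySem.List.pyGetD segs ((k : Int) + 1) "" = segs.getD (k + 1) "" := by
        have : ((k : Int) + 1) = (((k + 1 : Nat)) : Int) := by push_cast; ring
        rw [this, PySem.List.pyGetD_natCast]
      simp [h1]

-- main bridge: A's replaced-and-joined chars = interleaving of B's segments
lemma repl_ilv (s : String) (xs : List String) :
    ∀ (i : Int) (c : List String),
      ilv s ((segsF xs c).map String.toList) i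
        = ((c.map String.toList).flatten) ++ (((repl s xs i).map String.toList).flatten) := by
  induction xs with
  | nil =>
      intro i c
      simp [segsF, repl, ilv, toList_join_empty, join_empty_flatten]
  | cons v r ih =>
      intro i c
      by_cases h : v = "_"
      · subst h
        obtain ⟨u, rest, hur⟩ := List.exists_cons_of_ne_nil (segsF_ne_nil r [])
        rw [show segsF ("_" :: r) c = PySem.Str.join "" c :: segsF r [] from by simp [segsF]]
        rw [hur]
        simp only [List.map_cons]
        rw [show ilv s (String.toList (PySem.Str.join "" c) :: String.toList u :: rest.map String.toList) i
              = String.toList (PySem.Str.join "" c) ++ cstrL s i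
                  ++ ilv s (String.toList u :: rest.map String.toList) (i + 1) from rfl]
        have hih := ih (i + 1) []
        rw [hur] at hih
        simp only [List.map_nil, List.flatten_nil, List.nil_append, List.map_cons] at hih
        rw [hih]
        simp [repl, toList_join_empty, toList_cstrS, join_empty_flatten]
      · rw [show segsF (v :: r) c = segsF r (c ++ [v]) from by simp [segsF, h]]
        rw [ih i (c ++ [v])]
        simp [repl, h]

lemma pieces_ilv (s : String) :
    ∀ (rest : List (List Char)) (t : List Char) (j : Int),
      t ++ ((List.range rest.length).flatMap
              (fun (i : Nat) => cstrL s (j + (i : Int)) ++ rest.getD i []))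
        = ilv s (t :: rest) j := by
  intro rest
  induction rest with
  | nil => intro t j; simp [ilv]
  | cons u rest' ih =>
      intro t j
      rw [show (u :: rest').length = rest'.length + 1 from rfl, List.range_succ_eq_map,
          List.flatMap_cons, List.flatMap_map]
      have hfun : (fun (a : Nat) => cstrL s (j + ((a.succ : Nat) : Int)) ++ (u :: rest').getD a.succ [])
          = fun (a : Nat) => cstrL s ((j + 1) + (a : Int)) ++ rest'.getD a [] := by
        funext a
        have h1 : j + ((a.succ : Nat) : Int) = (j + 1) + (a : Int) := by push_cast; ring
        rw [h1]
        rfl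
      rw [hfun]
      have hih := ih u (j + 1)
      rw [show ilv s (t :: u :: rest') j = t ++ cstrL s j ++ ilv s (u :: rest') (j + 1) from rfl,
          ← hih]
      simp

-- flatten of a two-piece flatMap
lemma flatten_flatMap_pair {α : Type} (l : List α) (a b : α → List Char) :
    (l.flatMap (fun i => ([a i, b i] : List (List Char)))).flatten
      = l.flatMap (fun i => a i ++ b i) := by
  induction l with
  | nil => simp
  | cons x xs ih => simp [ih]

-- per-permutation equality of the two builds
lemma per_perm_eq (passList : List String) (perm : List String) :
    aBody passList perm = bBody passList perm := by
  set s := PySem.Str.join "" perm with hs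
  obtain ⟨g0, grest, hseg⟩ := List.exists_cons_of_ne_nil (segsF_ne_nil passList [])
  have hlen : grest.length = PySem.List.count passList "_" := by
    have := length_segsF passList []
    rw [hseg] at this
    simpa using this
  unfold aBody bBody
  rw [← hs, ← String.toList_inj, toList_join_empty, toList_join_empty, b_pieces_eq]
  rw [hseg]
  simp only [List.getD_cons_zero, List.map_cons, List.map_nil, List.flatten_cons,
    List.map_flatMap]
  rw [flatten_flatMap_pair]
  have hget : (fun (i : Nat) => (cstrS s (i : Int)).toList ++ ((g0 :: grest).getD (i + 1) "").toList)
      = fun (i : Nat) => cstrL s ((0 : Int) + (i : Int)) ++ (grest.map String.toList).getD i [] := by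
    funext i
    rw [toList_cstrS]
    have h2 : ((g0 :: grest).getD (i + 1) "").toList = (grest.map String.toList).getD i [] := by
      rw [List.getD_cons_succ]
      have := List.getD_map grest "" (n := i) String.toList
      simpa using this.symm
    rw [h2]
    norm_num
  rw [hget]
  have hrng : List.range (PySem.List.count passList "_") = List.range (grest.map String.toList).length := by
    simp [hlen]
  rw [hrng, pieces_ilv s (grest.map String.toList) g0.toList 0]
  have := repl_ilv s passList 0 []
  rw [hseg] at this
  simpa using this.symm

theorem calPossiblePass_spec : Claim_equal_calPossiblePass := by
  intro passList repAllowed possibleValues nPerms _ _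
  unfold Spec_calPossiblePass
  rw [A_closed, B_closed]
  exact List.map_congr_left (fun p _ => per_perm_eq passList p)
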